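-- pv_equiv track=rewrite | github.com/RuizhangZhou/aachen-termin-checker | summarize_history.py | _aggregate_weekdays
-- ===== SOURCE A (Python) =====
-- from typing import Any, Dict, Iterable, List, Sequence, Tuple
--
-- WEEKDAYS = ["Mon", "Tue", "Wed", "Thu", "Fri", "Sat", "Sun"]
--
-- def _aggregate_weekdays(buckets: Dict[str, Dict[str, Any]]) -> Dict[str, Dict[str, int]]:
--     totals: Dict[str, Dict[str, int]] = {day: {"checks": 0, "detections": 0} for day in WEEKDAYS}
--     for key, stats in buckets.items():
--         weekday = key.split()[0][:3]
--         if weekday not in totals: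
--             continue
--         totals[weekday]["checks"] += stats.get("checks", 0)
--         totals[weekday]["detections"] += stats.get("detections", 0)
--     return totals
-- ===== SOURCE B (Python) =====
-- WEEKDAYS = ["Mon", "Tue", "Wed", "Thu", "Fri", "Sat", "Sun"]
--
-- def _aggregate_weekdays(buckets):
--     return {
--         day: {
--             "checks": sum(stats.get("checks", 0)
--                           for key, stats in buckets.items()
--                           if key.split()[0][:3] == day),
--             "detections": sum(stats.get("detections", 0)
--                               for key, stats in buckets.items()
--                               if key.split()[0][:3] == day),
--         }
--         for day in WEEKDAYS
--     }
-- ===== Notes on version B (the rewrite author's own statement) =====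
-- stated objective: alternative
-- what changed: A makes one scatter pass over the buckets, mutating a pre-built per-weekday totals dict; B inverts the traversal: it loops over the seven fixed weekdays and, for each day and field, sums the matching entries in a filtered re-scan of buckets, building the result dict directly by comprehension.
import Mathlib
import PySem

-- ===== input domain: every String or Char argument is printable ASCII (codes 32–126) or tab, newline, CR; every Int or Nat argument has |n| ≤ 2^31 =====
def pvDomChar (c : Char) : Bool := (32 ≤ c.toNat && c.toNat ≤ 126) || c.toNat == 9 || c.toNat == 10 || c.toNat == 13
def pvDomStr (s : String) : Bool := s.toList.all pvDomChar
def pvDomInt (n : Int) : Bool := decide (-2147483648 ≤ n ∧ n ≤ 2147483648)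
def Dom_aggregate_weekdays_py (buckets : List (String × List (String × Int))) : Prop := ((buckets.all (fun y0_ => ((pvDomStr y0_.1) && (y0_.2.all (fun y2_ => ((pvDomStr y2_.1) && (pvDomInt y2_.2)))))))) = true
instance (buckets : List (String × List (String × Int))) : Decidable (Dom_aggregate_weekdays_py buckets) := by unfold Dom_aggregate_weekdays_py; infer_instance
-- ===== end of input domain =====

-- B inverts A's traversal: outer loop over the seven weekdays, summing a filtered re-scan of buckets per day/field (alternative decomposition, not claimed faster).

-- ===== PORT A =====
-- WEEKDAYS constant
def pvWeekdays : List String := ["Mon", "Tue", "Wed", "Thu", "Fri", "Sat", "Sun"]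

-- weekday abbreviation of a bucket key: first whitespace-separated word, truncated to 3 chars; none exactly where Python raises IndexError (whitespace-only key)
def pvDayOf? (key : String) : Option String :=
  (PySem.List.pyGet? (PySem.Str.split₀ key) 0).map (fun w => PySem.Str.slice w none (some 3))

def aggregate_weekdays_py (buckets : List (String × List (String × Int))) : List (String × List (String × Int)) :=
  let totals : PySem.Dict String (PySem.Dict String Int) :=
    pvWeekdays.foldl (fun d day =>
      d.insert day (PySem.Dict.mk [("checks", 0), ("detections", 0)])) PySem.Dict.empty
  let totals := buckets.foldl (fun totals kv =>
    match pvDayOf? kv.1 with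
    | none => totals  -- Python raises IndexError here; excluded by Pre_
    | some weekday =>
      if totals.contains weekday then
        let stats : PySem.Dict String Int := PySem.Dict.mk kv.2
        let inner := totals.getD weekday PySem.Dict.empty
        let inner := inner.insert "checks" (inner.getD "checks" 0 + stats.getD "checks" 0)
        let inner := inner.insert "detections" (inner.getD "detections" 0 + stats.getD "detections" 0)
        totals.insert weekday inner
      else totals) totals
  totals.items.map (fun p => (p.1, p.2.items))

-- ===== PORT B =====
-- the per-day generator sum over the entries of buckets whose weekday abbreviation equals day
def pvDaySum (buckets : List (String × List (String × Int))) (field day : String) : Int :=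
  ((buckets.filter (fun kv => pvDayOf? kv.1 == some day)).map
    (fun kv => (PySem.Dict.mk kv.2).getD field 0)).sum

def aggregate_weekdays_py_alt (buckets : List (String × List (String × Int))) : List (String × List (String × Int)) :=
  pvWeekdays.map (fun day =>
    (day, [("checks", pvDaySum buckets "checks" day),
           ("detections", pvDaySum buckets "detections" day)]))

-- ===== PRECONDITION & SPEC =====
-- Pre_ excludes buckets with a key holding no non-whitespace character: indexing the split of such a key raises IndexError in Python, in A and in B alike.
def Pre_aggregate_weekdays_py (buckets : List (String × List (String × Int))) : Prop :=
  ∀ kv ∈ buckets, PySem.Str.split₀ kv.1 ≠ []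
instance (buckets : List (String × List (String × Int))) : Decidable (Pre_aggregate_weekdays_py buckets) := by unfold Pre_aggregate_weekdays_py; infer_instance

def pvWitness_aggregate_weekdays_py : (List (String × List (String × Int))) :=
  [("Mon 12:00", [("checks", 3), ("detections", 1)]), ("Tuesday", [("checks", 2)]), ("xyz", [("detections", 7)])]

def Spec_aggregate_weekdays_py (buckets : List (String × List (String × Int))) (out : List (String × List (String × Int))) : Prop := out = aggregate_weekdays_py_alt buckets
instance (buckets : List (String × List (String × Int))) (out : List (String × List (String × Int))) : Decidable (Spec_aggregate_weekdays_py buckets out) := by unfold Spec_aggregate_weekdays_py; infer_instance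

-- ===== CLAIM (what is proved, stated in full; the proofs are below) =====
def Claim_equal_aggregate_weekdays_py : Prop := ∀ (buckets : List (String × List (String × Int))), Dom_aggregate_weekdays_py buckets → Pre_aggregate_weekdays_py buckets → Spec_aggregate_weekdays_py buckets (aggregate_weekdays_py buckets)

-- ===== LEMMAS AND PROOFS =====

-- the totals dict of A always has the shape {day: {"checks": _, "detections": _} for day in WEEKDAYS}
def pvInner (p : Int × Int) : PySem.Dict String Int := PySem.Dict.mk [("checks", p.1), ("detections", p.2)]
def pvState (v : String → Int × Int) : PySem.Dict String (PySem.Dict String Int) :=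
  PySem.Dict.mk (pvWeekdays.map (fun d => (d, pvInner (v d))))

-- A's loop body as a named function (definitionally equal to the lambda in the port)
def pvStepA (totals : PySem.Dict String (PySem.Dict String Int))
    (kv : String × List (String × Int)) : PySem.Dict String (PySem.Dict String Int) :=
  match pvDayOf? kv.1 with
  | none => totals
  | some weekday =>
    if totals.contains weekday then
      let stats : PySem.Dict String Int := PySem.Dict.mk kv.2
      let inner := totals.getD weekday PySem.Dict.empty
      let inner := inner.insert "checks" (inner.getD "checks" 0 + stats.getD "checks" 0)
      let inner := inner.insert "detections" (inner.getD "detections" 0 + stats.getD "detections" 0)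
      totals.insert weekday inner
    else totals

def pvUpd (kv : String × List (String × Int)) (v : String → Int × Int) : String → Int × Int :=
  fun d => if pvDayOf? kv.1 == some d then
      ((v d).1 + (PySem.Dict.mk kv.2).getD "checks" 0, (v d).2 + (PySem.Dict.mk kv.2).getD "detections" 0)
    else v d

lemma pvState_items (v : String → Int × Int) :
    (pvState v).items = pvWeekdays.map (fun d => (d, pvInner (v d))) := rfl

lemma pvState_keys (v : String → Int × Int) : (pvState v).keys = pvWeekdays := by
  show ((pvState v).items.map (·.1)) = pvWeekdays
  rw [pvState_items, List.map_map]
  exact List.map_id _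

lemma pvState_contains (v : String → Int × Int) (w : String) :
    (pvState v).contains w = decide (w ∈ pvWeekdays) := by
  rw [PySem.Dict.contains_eq_decide_mem_keys, pvState_keys]

lemma pvState_getD (v : String → Int × Int) (w : String) (hw : w ∈ pvWeekdays) :
    (pvState v).getD w PySem.Dict.empty = pvInner (v w) := by
  apply PySem.Dict.getD_of_mem_items
  · exact List.mem_map.mpr ⟨w, hw, rfl⟩
  · rw [pvState_keys]; decide

lemma pvState_congr (v v' : String → Int × Int) (h : ∀ d ∈ pvWeekdays, v d = v' d) :
    pvState v = pvState v' := by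
  unfold pvState
  exact congrArg PySem.Dict.mk (List.map_congr_left (fun d hd => by rw [h d hd]))

lemma pvState_insert (v : String → Int × Int) (w : String) (hw : w ∈ pvWeekdays) (q : Int × Int) :
    (pvState v).insert w (pvInner q) = pvState (fun d => if d = w then q else v d) := by
  apply PySem.Dict.ext
  rw [PySem.Dict.items_insert_of_contains _ _ (by rw [pvState_contains]; simpa),
      pvState_items, pvState_items, List.map_map]
  apply List.map_congr_left
  intro d hd
  by_cases hdw : d = w <;> simp [hdw]

lemma pvStepA_state (v : String → Int × Int) (kv : String × List (String × Int)) :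
    pvStepA (pvState v) kv = pvState (pvUpd kv v) := by
  unfold pvStepA pvUpd
  cases h : pvDayOf? kv.1 with
  | none =>
    exact pvState_congr _ _ (fun d _ => by simp)
  | some w =>
    dsimp only
    by_cases hw : w ∈ pvWeekdays
    · rw [pvState_contains]
      simp only [hw, decide_true, if_true]
      rw [pvState_getD v w hw]
      have : ((pvInner (v w)).insert "checks" ((pvInner (v w)).getD "checks" 0 + (PySem.Dict.mk kv.2).getD "checks" 0)).insert "detections"
          ((((pvInner (v w)).insert "checks" ((pvInner (v w)).getD "checks" 0 + (PySem.Dict.mk kv.2).getD "checks" 0))).getD "detections" 0 + (PySem.Dict.mk kv.2).getD "detections" 0)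
          = pvInner ((v w).1 + (PySem.Dict.mk kv.2).getD "checks" 0, (v w).2 + (PySem.Dict.mk kv.2).getD "detections" 0) := rfl
      rw [this, pvState_insert v w hw]
      apply pvState_congr
      intro d _
      by_cases hdw : d = w
      · simp [hdw]
      · have hne : (some w == some d) = false := by
          simp; exact fun e => hdw e.symm
        simp [hdw, hne]
    · rw [pvState_contains]
      simp only [hw, decide_false]
      apply pvState_congr
      intro d hd
      have hne : ¬ (some w == some d) = true := by
        simp; rintro rfl; exact hw hd
      simp [hne]

lemma pvDaySum_nil (field day : String) : pvDaySum [] field day = 0 := rfl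

lemma pvDaySum_cons (kv : String × List (String × Int)) (bs : List (String × List (String × Int)))
    (field day : String) :
    pvDaySum (kv :: bs) field day =
      (if pvDayOf? kv.1 == some day then (PySem.Dict.mk kv.2).getD field 0 else 0) + pvDaySum bs field day := by
  unfold pvDaySum
  rw [List.filter_cons]
  split_ifs <;> simp

lemma pvFold_state (bs : List (String × List (String × Int))) (v : String → Int × Int) :
    bs.foldl pvStepA (pvState v) =
      pvState (fun d => ((v d).1 + pvDaySum bs "checks" d, (v d).2 + pvDaySum bs "detections" d)) := by
  induction bs generalizing v with
  | nil =>
    apply pvState_congr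
    intro d _
    simp [pvDaySum_nil]
  | cons kv rest ih =>
    rw [List.foldl_cons, pvStepA_state, ih]
    apply pvState_congr
    intro d _
    rw [pvDaySum_cons, pvDaySum_cons]
    unfold pvUpd
    by_cases hc : (pvDayOf? kv.1 == some d) = true
    · simp only [hc, if_true, Prod.mk.injEq]
      constructor <;> ring
    · simp [hc]

lemma pvA_eq_alt (buckets : List (String × List (String × Int))) :
    aggregate_weekdays_py buckets = aggregate_weekdays_py_alt buckets := by
  show (buckets.foldl pvStepA (pvState (fun _ => (0, 0)))).items.map (fun p => (p.1, p.2.items))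
      = aggregate_weekdays_py_alt buckets
  rw [pvFold_state, pvState_items, List.map_map]
  unfold aggregate_weekdays_py_alt
  apply List.map_congr_left
  intro d _
  simp [pvInner]

-- ===== VERDICT (by name: the statement is the Claim_ definition above) =====
theorem aggregate_weekdays_py_spec : Claim_equal_aggregate_weekdays_py := by
  intro buckets _ _
  show aggregate_weekdays_py buckets = aggregate_weekdays_py_alt buckets
  exact pvA_eq_alt buckets
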